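-- pv_equiv track=rewrite | github.com/gabrieldelaparra/CC5508-2017-1-Tarea1 | tarea1.py | getEncodedText
-- ===== SOURCE A (Python) =====
-- END_OF_FILE = "$EOF"
--
-- def getEncodedNbits(nbits):
--     encodedNbits = []
--     tmp = int(nbits)
--     for i in range(0,4):
--         encodedNbits.append(tmp & 1)
--         tmp = tmp >> 1
--
--     return encodedNbits
--
-- def getEncodedText(nbits, text):
--     encodedText = []
--
--     #Convertir cada caracter a bits y agregarlos a una lista:
--     for char in text:
--         byte = []
--         tmp = ord(char)
--         for i in range(0,8):
--             byte.append(tmp & 1)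
--             tmp = tmp >> 1
--         # Agregar byts a la lista:
--         [encodedText.append(i) for i in byte[::-1]]
--
--     # Convertir cada caracter a bits y agregarlos a una lista:
--     for char in END_OF_FILE:
--         byte = []
--         tmp = ord(char)
--         for i in range(0, 8):
--             byte.append(tmp & 1)
--             tmp = tmp >> 1
--         # Agregar byts a la lista:
--         [encodedText.append(i) for i in byte[::-1]]
--
--     #Insertar al inicio los NBits para poder después decriptar:
--     [encodedText.insert(0, i) for i in getEncodedNbits(nbits)]
--
--     return encodedText
-- ===== SOURCE B (Python) =====
-- END_OF_FILE = "$EOF"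
--
-- def getEncodedText(nbits, text):
--     # 4-bit header (MSB first), then 8 bits per character of text + END_OF_FILE.
--     bits = [int(b) for b in format(int(nbits) % 16, '04b')]
--     for ch in text + END_OF_FILE:
--         bits.extend(int(b) for b in format(ord(ch) % 256, '08b'))
--     return bits
-- ===== Notes on version B (the rewrite author's own statement) =====
-- stated objective: simpler
-- what changed: B formats each value directly as fixed-width MSB-first binary (format '04b'/'08b') and concatenates header-then-bytes in one pass over text+EOF, eliminating A's LSB-first bit collection, the [::-1] reversal of every byte, and the quadratic insert(0,...) fold that prepends the header.
import Mathlib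
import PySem

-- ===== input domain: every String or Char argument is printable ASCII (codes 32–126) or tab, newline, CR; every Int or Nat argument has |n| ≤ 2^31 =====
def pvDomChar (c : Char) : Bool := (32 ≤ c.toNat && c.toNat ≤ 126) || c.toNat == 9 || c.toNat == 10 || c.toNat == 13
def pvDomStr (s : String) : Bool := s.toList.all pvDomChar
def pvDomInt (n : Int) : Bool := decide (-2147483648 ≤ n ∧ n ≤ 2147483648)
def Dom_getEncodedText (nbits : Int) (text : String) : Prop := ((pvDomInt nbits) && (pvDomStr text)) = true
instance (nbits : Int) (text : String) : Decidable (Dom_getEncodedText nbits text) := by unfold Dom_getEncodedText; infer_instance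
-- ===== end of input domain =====

-- B builds the bit list by formatting each value as fixed-width binary (4-bit header
-- first, then 8 bits MSB-first per character of text + EOF), replacing A's LSB-first
-- collect / [::-1] reverse / repeated insert(0, ...) machinery; objective: simpler.


-- ===== PORT A =====
-- tmp & 1 → PySem.Int.band tmp 1; tmp >> 1 → PySem.Int.floordiv tmp 2 (Python's >> floors; exact)
def getEncodedNbits (nbits : Int) : List Int :=
  ((PySem.List.pyRange 0 4 1).foldl
    (fun (st : List Int × Int) _ => (st.1 ++ [PySem.Int.band st.2 1], PySem.Int.floordiv st.2 2))
    ([], nbits)).1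

-- the inlined 8-iteration byte loop of A (it appears twice, verbatim, in the Python; used twice below)
def pvByteLoop (n : Int) : List Int :=
  ((PySem.List.pyRange 0 8 1).foldl
    (fun (st : List Int × Int) _ => (st.1 ++ [PySem.Int.band st.2 1], PySem.Int.floordiv st.2 2))
    ([], n)).1

def getEncodedText (nbits : Int) (text : String) : List Int :=
  -- byte[::-1] → List.reverse (exact: PySem.List.slice?_none_none_neg_one)
  let afterText := text.toList.foldl
    (fun acc c => acc ++ (pvByteLoop (c.toNat : Int)).reverse) []
  let afterEOF := ("$EOF".toList).foldl
    (fun acc c => acc ++ (pvByteLoop (c.toNat : Int)).reverse) afterText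
  (getEncodedNbits nbits).foldl (fun acc i => PySem.List.insert acc 0 i) afterEOF

-- ===== PORT B =====
-- format(x, '0<w>b') as a digit list, MSB first; exact for 0 ≤ x < 2^w (the reduced values B feeds it)
def pvFmtBits (w : Nat) (x : Int) : List Int :=
  (List.range w).map (fun i => x / 2 ^ (w - 1 - i) % 2)

def getEncodedText_alt (nbits : Int) (text : String) : List Int :=
  ((text ++ "$EOF").toList).foldl
    (fun bits ch => bits ++ pvFmtBits 8 (PySem.Int.mod (ch.toNat : Int) 256))
    (pvFmtBits 4 (PySem.Int.mod nbits 16))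

-- ===== PRECONDITION & SPEC =====
def Spec_getEncodedText (nbits : Int) (text : String) (out : List Int) : Prop := out = getEncodedText_alt nbits text
instance (nbits : Int) (text : String) (out : List Int) : Decidable (Spec_getEncodedText nbits text out) := by unfold Spec_getEncodedText; infer_instance

-- ===== CLAIM (what is proved, stated in full; the proofs are below) =====
def Claim_equal_getEncodedText : Prop := ∀ (nbits : Int) (text : String), Dom_getEncodedText nbits text → Spec_getEncodedText nbits text (getEncodedText nbits text)

-- ===== LEMMAS AND PROOFS =====

-- A's reversed LSB-first byte = B's MSB-first formatted byte (true for every Int, so for every char code)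
theorem byteLoop_rev (n : Int) :
    (pvByteLoop n).reverse = pvFmtBits 8 (PySem.Int.mod n 256) := by
  have hl : PySem.List.pyRange 0 8 1 = [0,1,2,3,4,5,6,7] := by decide
  have hr : List.range 8 = [0,1,2,3,4,5,6,7] := by decide
  simp only [pvByteLoop, pvFmtBits, hl, hr, List.foldl, List.map,
    PySem.Int.band_one,
    PySem.Int.mod_eq_emod_of_pos (show (0:Int) < 256 by norm_num),
    PySem.Int.mod_eq_emod_of_pos (show (0:Int) < 2 by norm_num),
    PySem.Int.floordiv_eq_ediv_of_pos (show (0:Int) < 2 by norm_num)]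
  norm_num [List.cons.injEq]
  omega

-- A's insert(0, …) fold over the LSB-first header prepends B's MSB-first header
theorem headerFold_eq (nbits : Int) (L : List Int) :
    (getEncodedNbits nbits).foldl (fun acc i => PySem.List.insert acc 0 i) L
      = pvFmtBits 4 (PySem.Int.mod nbits 16) ++ L := by
  have hl : PySem.List.pyRange 0 4 1 = [0,1,2,3] := by decide
  have hr : List.range 4 = [0,1,2,3] := by decide
  simp only [getEncodedNbits, pvFmtBits, hl, hr, List.foldl, List.map,
    PySem.List.insert_zero, PySem.Int.band_one,
    PySem.Int.mod_eq_emod_of_pos (show (0:Int) < 16 by norm_num),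
    PySem.Int.mod_eq_emod_of_pos (show (0:Int) < 2 by norm_num),
    PySem.Int.floordiv_eq_ediv_of_pos (show (0:Int) < 2 by norm_num)]
  norm_num [List.cons.injEq]
  omega

-- folding "acc ++ h c" from init = init ++ the concatenation of the per-char blocks
theorem foldl_append_blocks (h : Char → List Int) :
    ∀ (l : List Char) (init : List Int),
      l.foldl (fun a c => a ++ h c) init = init ++ l.flatMap h := by
  intro l
  induction l with
  | nil => simp
  | cons c cs ih => intro init; simp [List.foldl_cons, ih, List.append_assoc]

-- ===== VERDICT (by name: the statement is the Claim_ definition above) =====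
theorem getEncodedText_spec : Claim_equal_getEncodedText := by
  intro nbits text _
  show getEncodedText nbits text = getEncodedText_alt nbits text
  have hfun : (fun (acc : List Int) (c : Char) => acc ++ (pvByteLoop (c.toNat : Int)).reverse)
      = (fun acc c => acc ++ pvFmtBits 8 (PySem.Int.mod (c.toNat : Int) 256)) := by
    funext acc c; rw [byteLoop_rev]
  simp only [getEncodedText, getEncodedText_alt, hfun, headerFold_eq,
    String.toList_append, List.foldl_append, foldl_append_blocks]
  simp [List.append_assoc]
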